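-- pv_equiv track=rewrite | github.com/miseongk/Algorithm | BAEKJOON/Part/Part2/2504_ex.py | func
-- ===== SOURCE A (Python) =====
-- def func(p):
--     if len(p) == 0:
--         return 1
--     dic = {'(': ')', '[': ']'}
--     ans, sub, stack = 0, '', []
--     for i in p:
--         sub += i
--         if len(stack) > 0 and dic.get(stack[-1], '') == i:
--             stack.pop()
--         else:
--             stack.append(i)
--         if len(stack) == 0:
--             ans, sub = ans + func(sub[1:-1]) * (2 if sub[0] == '(' else 3), ''
--     if len(stack) > 0:
--         return 0
--     return ans
-- ===== SOURCE B (Python) =====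
-- def func(p):
--     # One-pass stack machine: each frame saves the sum accumulated at the outer
--     # level; closing a bracket folds the inner sum back in.  O(n), no recursion.
--     close = {')': '(', ']': '['}
--     acc, frames = 0, []
--     for ch in p:
--         if ch == '(' or ch == '[':
--             frames.append((ch, acc))
--             acc = 0
--         elif ch == ')' or ch == ']':
--             if not frames or frames[-1][0] != close[ch]:
--                 return 0
--             b, saved = frames.pop()
--             acc = saved + (2 if b == '(' else 3) * (acc if acc else 1)
--         else:
--             return 0
--     return acc if not frames else 0
-- ===== Notes on version B (the rewrite author's own statement) =====
-- stated objective: faster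
-- what changed: Replaces A's per-chunk string accumulation plus recursive re-parse of each bracket's interior by a single left-to-right pass with a stack of (bracket, saved-sum) frames, folding each closed bracket's value in immediately.
-- intended difference: On the empty string A returns 1 (the base value its recursion uses for the interior of an empty bracket pair), while B returns 0, the intended value of a sequence containing no brackets; BOJ 2504 input is never empty. — e.g. on func(""): A returns 1, B returns 0
import Mathlib
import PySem

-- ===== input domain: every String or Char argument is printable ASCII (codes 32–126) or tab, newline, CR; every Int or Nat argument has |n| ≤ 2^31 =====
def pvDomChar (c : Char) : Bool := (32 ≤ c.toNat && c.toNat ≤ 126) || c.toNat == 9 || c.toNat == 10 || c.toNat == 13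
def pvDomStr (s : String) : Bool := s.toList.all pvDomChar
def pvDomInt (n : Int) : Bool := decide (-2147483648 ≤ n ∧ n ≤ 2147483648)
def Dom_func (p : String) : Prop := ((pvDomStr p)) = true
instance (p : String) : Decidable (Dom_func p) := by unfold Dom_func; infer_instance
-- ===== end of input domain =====

-- B replaces A's quadratic rescan-and-recurse chunking by a single O(n) stack pass;
-- on the empty string A returns 1 (its recursion base) while B returns 0 (see D_func).

-- ===== PORT A =====
-- transliterates `dic.get(stack[-1], '') == i` (the default '' never equals a char)
def aMatch (t c : Char) : Bool := (t == '(' && c == ')') || (t == '[' && c == ']')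

-- Python's recursion is total (the recursive call is on a strict substring); the
-- fuel argument (|p|+1 at top level, always sufficient) is only a totality guard.
-- Python pushes/pops the stack at the right end; ported with top-at-head (c :: stack).
mutual
def funcGo (f : Nat) (l : List Char) : Int :=
  match f with
  | 0 => 0                                   -- never reached with fuel |p|+1
  | f + 1 => if l = [] then 1 else funcLoop f l [] [] 0
  termination_by (f, 0)

def funcLoop (f : Nat) (rest sub stack : List Char) (ans : Int) : Int :=
  match rest with
  | [] => if stack = [] then ans else 0
  | c :: r =>
    let sub' := sub ++ [c]                   -- sub += i
    match stack with
    | t :: st' =>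
      if aMatch t c then                     -- stack.pop()
        if st' = [] then                     -- len(stack) == 0: fold a chunk
          funcLoop f r [] []
            (ans + funcGo f ((sub'.drop 1).dropLast) * (if sub'.headD ' ' = '(' then 2 else 3))
        else funcLoop f r sub' st' ans
      else funcLoop f r sub' (c :: stack) ans  -- stack.append(i)
    | [] => funcLoop f r sub' (c :: stack) ans
  termination_by (f, rest.length + 1)
end

def func (p : String) : Int := funcGo (p.toList.length + 1) p.toList

-- ===== PORT B =====
-- Source B's loop body: one step of the stack machine (frames top-at-head; none = early `return 0`)
def bStep (s : Option (Int × List (Char × Int))) (ch : Char) : Option (Int × List (Char × Int)) :=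
  match s with
  | none => none
  | some (acc, frames) =>
    if ch = '(' ∨ ch = '[' then some (0, (ch, acc) :: frames)
    else if ch = ')' ∨ ch = ']' then
      match frames with
      | [] => none
      | (b, saved) :: fr =>
        if b = (if ch = ')' then '(' else '[') then
          some (saved + (if b = '(' then 2 else 3) * (if acc = 0 then 1 else acc), fr)
        else none
    else none

def func_alt (p : String) : Int :=
  match p.toList.foldl bStep (some (0, [])) with
  | some (acc, frames) => if frames = [] then acc else 0
  | none => 0

-- ===== PRECONDITION & SPEC =====
-- On the empty string A returns 1 (the base value its recursion uses for the interior of an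
-- empty bracket pair), while B returns 0, the intended value of a sequence with no brackets.
def D_func (p : String) : Prop := p = ""
instance (p : String) : Decidable (D_func p) := by unfold D_func; infer_instance

def Spec_func (p : String) (out : Int) : Prop := ¬ D_func p → out = func_alt p
instance (p : String) (out : Int) : Decidable (Spec_func p out) := by unfold Spec_func; infer_instance

def pvDiffWitness_func : String := ""
def pvDiffWitnessOut_func : Int × Int := (1, 0)

-- ===== CLAIM (what is proved, stated in full; the proofs are below) =====
def Claim_unchanged_func : Prop := ∀ (p : String), Dom_func p → Spec_func p (func p)
def Claim_changed_func : Prop := Dom_func (pvDiffWitness_func) ∧ D_func (pvDiffWitness_func) ∧ func (pvDiffWitness_func) = pvDiffWitnessOut_func.1 ∧ func_alt (pvDiffWitness_func) = pvDiffWitnessOut_func.2 ∧ pvDiffWitnessOut_func.1 ≠ pvDiffWitnessOut_func.2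
def Claim_exact_func : Prop := ∀ (p : String), Dom_func p → D_func p → func p ≠ func_alt p

-- ===== LEMMAS AND PROOFS =====

-- `Bal s v`: s is a balanced bracket sequence of value v (the BOJ 2504 semantics).
inductive Bal : List Char → Int → Prop
  | nil : Bal [] 0
  | node (c d : Char) (w : Int) (m t : List Char) (u v : Int) :
      ((c = '(' ∧ d = ')' ∧ w = 2) ∨ (c = '[' ∧ d = ']' ∧ w = 3)) →
      Bal m u → Bal t v → Bal (c :: m ++ d :: t) (w * (if u = 0 then 1 else u) + v)

theorem Bal_append {s t : List Char} {v w : Int} (hs : Bal s v) (ht : Bal t w) :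
    Bal (s ++ t) (v + w) := by
  induction hs with
  | nil => simpa using ht
  | node c d w' m t' u v' hcd hm ht' ihm iht =>
    have := Bal.node c d w' m (t' ++ t) u (v' + w) hcd hm (iht)
    simpa [add_assoc] using this

theorem Bal_nonneg {s : List Char} {v : Int} (h : Bal s v) : 0 ≤ v := by
  induction h with
  | nil => simp
  | node c d w m t u v hcd hm ht ihm iht =>
    rcases hcd with ⟨_, _, rfl⟩ | ⟨_, _, rfl⟩ <;> split <;> omega

theorem Bal_pos {s : List Char} {v : Int} (h : Bal s v) :
    (s = [] ∧ v = 0) ∨ (s ≠ [] ∧ 2 ≤ v) := by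
  cases h with
  | nil => exact Or.inl ⟨rfl, rfl⟩
  | node c d w m t u v hcd hm ht =>
    refine Or.inr ⟨by simp, ?_⟩
    have hu := Bal_nonneg hm
    have hv := Bal_nonneg ht
    rcases hcd with ⟨_, _, rfl⟩ | ⟨_, _, rfl⟩ <;> split <;> omega

def runB (l : List Char) (s : Option (Int × List (Char × Int))) :
    Option (Int × List (Char × Int)) := l.foldl bStep s

def finishB (s : Option (Int × List (Char × Int))) : Int :=
  match s with
  | some (acc, frames) => if frames = [] then acc else 0
  | none => 0

def altval (l : List Char) : Int := finishB (runB l (some (0, [])))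

theorem funcAlt_eq (p : String) : func_alt p = altval p.toList := rfl

theorem runB_none (l : List Char) : List.foldl bStep none l = none := by
  induction l with
  | nil => rfl
  | cons c r ih => simpa [bStep] using ih

-- running a balanced sequence just adds its value at the current level
theorem runB_bal {s : List Char} {v : Int} (h : Bal s v) (a : Int)
    (FR : List (Char × Int)) : runB s (some (a, FR)) = some (a + v, FR) := by
  induction h generalizing a FR with
  | nil => simp [runB]
  | node c d w m t u v hcd hm ht ihm iht =>
    have hopen : c = '(' ∨ c = '[' := by rcases hcd with ⟨h1, _, _⟩ | ⟨h1, _, _⟩ <;> simp [h1]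
    have step1 : bStep (some (a, FR)) c = some (0, (c, a) :: FR) := by
      simp [bStep, hopen]
    have step2 : bStep (some (u, (c, a) :: FR)) d
        = some (a + w * (if u = 0 then 1 else u), FR) := by
      rcases hcd with ⟨hc, hd, hw⟩ | ⟨hc, hd, hw⟩ <;> simp [bStep, hc, hd, hw]
    calc runB (c :: m ++ d :: t) (some (a, FR))
        = runB t (bStep (runB m (some (0, (c, a) :: FR))) d) := by
          simp [runB, List.foldl_cons, List.foldl_append, step1]
      _ = some (a + (w * (if u = 0 then 1 else u) + v), FR) := by
          rw [ihm]
          simp only [zero_add, step2]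
          rw [iht]
          ring_nf
      _ = _ := rfl

-- `Conf sub FR acc ans`: the A-loop state (sub, stack = FR.map fst, ans) corresponds
-- to the B-machine state (acc, FR).
inductive Conf : List Char → List (Char × Int) → Int → Int → Prop
  | base (a : Int) : Conf [] [] a a
  | frame (s : List Char) (FR : List (Char × Int)) (o : Char) (m : List Char)
      (a1 acc ans : Int) :
      Conf s FR a1 ans → (o = '(' ∨ o = '[') → Bal m acc →
      Conf (s ++ o :: m) ((o, a1) :: FR) acc ans

theorem aMatch_open {t c : Char} (h : aMatch t c = true) : t = '(' ∨ t = '[' := by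
  simp only [aMatch, Bool.or_eq_true, Bool.and_eq_true, beq_iff_eq] at h
  rcases h with ⟨h1, _⟩ | ⟨h1, _⟩ <;> simp [h1]

-- once a non-open character is on A's stack, A returns 0
theorem funcLoop_dead (rest : List Char) : ∀ (f : Nat) (sub stack : List Char) (ans : Int)
    (bad : Char), bad ∈ stack → ¬(bad = '(' ∨ bad = '[') →
    funcLoop f rest sub stack ans = 0 := by
  induction rest with
  | nil =>
    intro f sub stack ans bad hmem hbad
    have : stack ≠ [] := by rintro rfl; simp at hmem
    simp [funcLoop, this]
  | cons c r ih =>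
    intro f sub stack ans bad hmem hbad
    match stack, hmem with
    | t :: st', hmem =>
      rw [funcLoop]
      by_cases hm : aMatch t c
      · have hto := aMatch_open hm
        have hbt : bad ≠ t := by rintro rfl; exact hbad hto
        have hmem' : bad ∈ st' := by
          rcases List.mem_cons.mp hmem with h | h
          · exact absurd h hbt
          · exact h
        have hne : st' ≠ [] := by rintro rfl; simp at hmem'
        simp only [hm, if_true, hne, if_false]
        exact ih f _ st' ans bad hmem' hbad
      · simp only [hm]
        exact ih f _ (c :: t :: st') ans bad (List.mem_cons_of_mem _ hmem) hbad

-- the main simulation: A's loop tracks the B machine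
theorem aMatch_false_of_open {t c : Char} (h : c = '(' ∨ c = '[') : aMatch t c = false := by
  rcases h with rfl | rfl <;> simp [aMatch]

theorem aMatch_false_of_junk {t c : Char} (h2 : ¬(c = ')' ∨ c = ']')) : aMatch t c = false := by
  push Not at h2
  simp [aMatch, h2.1, h2.2]

theorem Conf_nil {sub : List Char} {acc ans : Int} (h : Conf sub [] acc ans) :
    sub = [] ∧ acc = ans := by
  cases h; exact ⟨rfl, rfl⟩

theorem Conf_cons {sub : List Char} {b : Char} {a1 : Int} {FR' : List (Char × Int)}
    {acc ans : Int} (h : Conf sub ((b, a1) :: FR') acc ans) :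
    ∃ s m, sub = s ++ b :: m ∧ Conf s FR' a1 ans ∧ (b = '(' ∨ b = '[') ∧ Bal m acc := by
  cases h with
  | frame s FR o m a1' acc' ans' h1 h2 h3 => exact ⟨s, m, rfl, h1, h2, h3⟩

-- one-step unfoldings of A's loop
theorem funcLoop_push (f : Nat) (r sub stack : List Char) (ans : Int) (c : Char)
    (h : ∀ t st', stack = t :: st' → aMatch t c = false) :
    funcLoop f (c :: r) sub stack ans = funcLoop f r (sub ++ [c]) (c :: stack) ans := by
  cases stack with
  | nil => rw [funcLoop.eq_def]
  | cons t st' => rw [funcLoop.eq_def]; simp [h t st' rfl]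

theorem funcLoop_pop (f : Nat) (r sub st' : List Char) (ans : Int) (c t : Char)
    (h : aMatch t c = true) :
    funcLoop f (c :: r) sub (t :: st') ans =
      if st' = [] then
        funcLoop f r [] []
          (ans + funcGo f (((sub ++ [c]).drop 1).dropLast) *
            (if (sub ++ [c]).headD ' ' = '(' then 2 else 3))
      else funcLoop f r (sub ++ [c]) st' ans := by
  rw [funcLoop.eq_def]; simp [h]

-- pushing a non-open character makes A return 0
theorem funcLoop_deadstep (f : Nat) (r sub stack : List Char) (ans : Int) (c : Char)
    (hopen : ¬(c = '(' ∨ c = '['))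
    (h : ∀ t st', stack = t :: st' → aMatch t c = false) :
    funcLoop f (c :: r) sub stack ans = 0 := by
  rw [funcLoop_push f r sub stack ans c h]
  exact funcLoop_dead r f (sub ++ [c]) (c :: stack) ans c (by simp) hopen

theorem core (n : Nat)
    (ihgo : ∀ (m : List Char) (f : Nat), m.length < n → m.length ≤ f → m ≠ [] →
      funcGo (f + 1) m = altval m) :
    ∀ (rest sub : List Char) (FR : List (Char × Int)) (acc ans : Int) (f : Nat),
      Conf sub FR acc ans → sub.length + rest.length ≤ n → sub.length + rest.length ≤ f →
      funcLoop f rest sub (FR.map Prod.fst) ans = finishB (runB rest (some (acc, FR))) := by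
  intro rest
  induction rest with
  | nil =>
    intro sub FR acc ans f hconf hn hf
    cases FR with
    | nil =>
      obtain ⟨rfl, rfl⟩ := Conf_nil hconf
      simp [funcLoop, runB, finishB]
    | cons fr FR' => rw [funcLoop.eq_def]; simp [runB, finishB]
  | cons c r ih =>
    intro sub FR acc ans f hconf hn hf
    by_cases hopen : c = '(' ∨ c = '['
    · -- push: both programs open a new frame
      have hstep : bStep (some (acc, FR)) c = some (0, (c, acc) :: FR) := by
        simp [bStep, hopen]
      have hconf' : Conf (sub ++ [c]) ((c, acc) :: FR) 0 ans := by
        simpa using Conf.frame sub FR c [] acc 0 ans hconf hopen Bal.nil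
      have ihr := ih (sub ++ [c]) ((c, acc) :: FR) 0 ans f hconf'
        (by simp at hn ⊢; omega) (by simp at hf ⊢; omega)
      rw [funcLoop_push f r sub _ ans c
        (fun t st' hst => by rw [aMatch_false_of_open hopen])]
      rw [show runB (c :: r) (some (acc, FR)) = runB r (some (0, (c, acc) :: FR)) by
        simp [runB, hstep]]
      rw [← ihr]
      rfl
    · by_cases hclose : c = ')' ∨ c = ']'
      · cases FR with
        | nil =>
          -- close on an empty stack: A goes dead, B returns none
          obtain ⟨rfl, rfl⟩ := Conf_nil hconf
          have hstep : bStep (some (acc, ([] : List (Char × Int)))) c = none := by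
            rcases hclose with rfl | rfl <;> simp [bStep]
          rw [show (([] : List (Char × Int)).map Prod.fst) = [] from rfl]
          rw [funcLoop_deadstep f r [] [] acc c hopen (by intro t st' h; cases h)]
          rw [runB, List.foldl_cons, hstep, runB_none r]
          rfl
        | cons fr FR' =>
          obtain ⟨b, a1⟩ := fr
          obtain ⟨s, m, rfl, hconf', hbopen, hbal⟩ := Conf_cons hconf
          by_cases hm : aMatch b c = true
          · -- matching close
            have hw : (b = '(' ∧ c = ')') ∨ (b = '[' ∧ c = ']') := by
              simpa [aMatch] using hm
            have hstep : bStep (some (acc, (b, a1) :: FR')) c =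
                some (a1 + (if b = '(' then 2 else 3) * (if acc = 0 then 1 else acc), FR') := by
              rcases hw with ⟨rfl, rfl⟩ | ⟨rfl, rfl⟩ <;> simp [bStep]
            have hrun : runB (c :: r) (some (acc, (b, a1) :: FR')) =
                runB r (some (a1 + (if b = '(' then 2 else 3) * (if acc = 0 then 1 else acc), FR')) := by
              rw [runB, List.foldl_cons, hstep]; rfl
            have hitecc : (if m = [] then (1 : Int) else acc) = (if acc = 0 then 1 else acc) := by
              rcases Bal_pos hbal with ⟨rfl, rfl⟩ | ⟨hne, hge⟩
              · simp
              · rw [if_neg hne, if_neg (by omega)]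
            rw [hrun]
            rw [show List.map Prod.fst ((b, a1) :: FR') = b :: FR'.map Prod.fst from rfl]
            rw [funcLoop_pop f r (s ++ b :: m) (FR'.map Prod.fst) ans c b hm]
            cases FR' with
            | nil =>
              -- bottom frame closes: A folds the chunk through a recursive call
              obtain ⟨rfl, rfl⟩ := Conf_nil hconf'
              simp only [List.map_nil, List.nil_append]
              rw [if_pos trivial]
              obtain ⟨f', rfl⟩ : ∃ f', f = f' + 1 := by
                cases f with
                | zero => exfalso; simp at hf
                | succ k => exact ⟨k, rfl⟩
              have hgo : funcGo (f' + 1) ((((b :: m) ++ [c]).drop 1).dropLast)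
                  = (if acc = 0 then 1 else acc) := by
                rw [show ((((b :: m) ++ [c]).drop 1).dropLast) = m by simp]
                rw [← hitecc]
                rcases Bal_pos hbal with ⟨rfl, rfl⟩ | ⟨hne, hge⟩
                · simp [funcGo]
                · rw [ihgo m f' (by simp at hn; omega) (by simp at hf; omega) hne]
                  rw [if_neg hne]
                  unfold altval
                  rw [runB_bal hbal 0 []]
                  simp [finishB]
              rw [hgo]
              have hhead : ((b :: m ++ [c]).headD ' ') = b := rfl
              simp only [hhead]
              rw [show a1 + (if acc = 0 then (1:Int) else acc) * (if b = '(' then (2:Int) else 3)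
                  = a1 + (if b = '(' then (2:Int) else 3) * (if acc = 0 then 1 else acc) by ring]
              exact ih [] []
                (a1 + (if b = '(' then (2:Int) else 3) * (if acc = 0 then 1 else acc))
                (a1 + (if b = '(' then (2:Int) else 3) * (if acc = 0 then 1 else acc))
                (f' + 1) (Conf.base _) (by simp at hn ⊢; omega) (by simp at hf ⊢; omega)
            | cons fr2 FR'' =>
              obtain ⟨b2, a2⟩ := fr2
              obtain ⟨s2, m2, rfl, hconf2, hb2open, hbal2⟩ := Conf_cons hconf'
              simp only [List.map_cons]
              rw [if_neg (by simp)]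
              have hchunk : Bal (b :: m ++ [c]) ((if b = '(' then (2:Int) else 3) *
                  (if acc = 0 then 1 else acc)) := by
                have hd : (b = '(' ∧ c = ')' ∧ (if b = '(' then (2:Int) else 3) = 2) ∨
                    (b = '[' ∧ c = ']' ∧ (if b = '(' then (2:Int) else 3) = 3) := by
                  rcases hw with ⟨rfl, rfl⟩ | ⟨rfl, rfl⟩ <;> simp
                have := Bal.node b c _ m [] acc 0 hd hbal Bal.nil
                simpa using this
              have hbal2' : Bal (m2 ++ (b :: m ++ [c]))
                  (a1 + (if b = '(' then (2:Int) else 3) * (if acc = 0 then 1 else acc)) :=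
                Bal_append hbal2 hchunk
              have hconfnew : Conf (((s2 ++ b2 :: m2) ++ b :: m) ++ [c]) ((b2, a2) :: FR'')
                  (a1 + (if b = '(' then (2:Int) else 3) * (if acc = 0 then 1 else acc)) ans := by
                have := Conf.frame s2 FR'' b2 (m2 ++ (b :: m ++ [c])) a2 _ ans
                  hconf2 hb2open hbal2'
                simpa using this
              have := ih (((s2 ++ b2 :: m2) ++ b :: m) ++ [c]) ((b2, a2) :: FR'') _ ans f
                hconfnew (by simp at hn ⊢; omega) (by simp at hf ⊢; omega)
              simpa using this
          · -- mismatched close: A goes dead, B returns none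
            have hstep : bStep (some (acc, (b, a1) :: FR')) c = none := by
              have hb : ¬ (b = (if c = ')' then '(' else '[')) := by
                intro hb
                apply hm
                rcases hclose with rfl | rfl <;> simp_all [aMatch]
              rcases hclose with rfl | rfl <;> simp_all [bStep]
            rw [show List.map Prod.fst ((b, a1) :: FR') = b :: FR'.map Prod.fst from rfl]
            rw [funcLoop_deadstep f r _ _ ans c hopen
              (by intro t st' h; cases h; simpa using hm)]
            rw [runB, List.foldl_cons, hstep, runB_none r]
            rfl
      · -- junk character: A goes dead, B returns none
        have hstep : bStep (some (acc, FR)) c = none := by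
          push Not at hopen hclose
          simp [bStep, hopen.1, hopen.2, hclose.1, hclose.2]
        rw [funcLoop_deadstep f r sub _ ans c hopen
          (by intro t st' h; rw [aMatch_false_of_junk hclose])]
        rw [runB, List.foldl_cons, hstep, runB_none r]
        rfl

theorem main_eq : ∀ (n : Nat) (l : List Char) (f : Nat), l.length ≤ n → l.length ≤ f →
    l ≠ [] → funcGo (f + 1) l = altval l := by
  intro n
  induction n using Nat.strong_induction_on with
  | _ n ihn =>
    intro l f hn hf hne
    have ihgo : ∀ (m : List Char) (f' : Nat), m.length < l.length → m.length ≤ f' → m ≠ [] →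
        funcGo (f' + 1) m = altval m := by
      intro m f' hm hmf hne'
      exact ihn m.length (lt_of_lt_of_le hm hn) m f' le_rfl hmf hne'
    rw [funcGo]
    simp only [hne, if_false]
    have := core l.length ihgo l [] [] 0 0 f (Conf.base 0) (by simp) (by simpa using hf)
    simpa [altval] using this

-- ===== VERDICT (by name: the statement is the Claim_ definition above) =====
theorem func_spec : Claim_unchanged_func := by
  intro p _ hD
  have hl : p.toList ≠ [] := by
    intro h
    exact hD (String.toList_eq_nil_iff.mp h)
  rw [funcAlt_eq]
  exact main_eq p.toList.length p.toList p.toList.length le_rfl le_rfl hl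

theorem func_A_empty : func "" = 1 := by
  simp [func, funcGo]

theorem func_changed : Claim_changed_func := by
  unfold Claim_changed_func
  refine ⟨by decide, rfl, ?_, by decide, by decide⟩
  simpa [pvDiffWitness_func, pvDiffWitnessOut_func] using func_A_empty

theorem func_tight : Claim_exact_func := by
  intro p _ hD
  unfold D_func at hD
  subst hD
  rw [func_A_empty]
  decide
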